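-- pv_equiv track=rewrite | github.com/ANG3L2007/TRABAJOS-Y-PROYECTOS-DE-LA-UNI | PYTHON/ejercicios laboratorio/Ejercicios Taller 4/14. add  _  .py | guion
-- ===== SOURCE A (Python) =====
-- def guion (cadena):
--     resultado="_"
--     i=0
--     while i<len(cadena):
--         if cadena[i]==" ":
--             resultado += cadena[i]
--             resultado+= "_"
--             i+=1
--         else:
--             resultado +=cadena[i]
--             i+=1
--
--     return resultado
-- ===== SOURCE B (Python) =====
-- def guion(cadena):
--     return "_" + cadena.replace(" ", " _")
-- ===== Notes on version B (the rewrite author's own statement) =====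
-- stated objective: idiomatic
-- what changed: Replaces the index-driven while loop with per-character accumulator appends by a single closed-form expression: prepend an underscore and map every space to space+underscore with str.replace.
import Mathlib
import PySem

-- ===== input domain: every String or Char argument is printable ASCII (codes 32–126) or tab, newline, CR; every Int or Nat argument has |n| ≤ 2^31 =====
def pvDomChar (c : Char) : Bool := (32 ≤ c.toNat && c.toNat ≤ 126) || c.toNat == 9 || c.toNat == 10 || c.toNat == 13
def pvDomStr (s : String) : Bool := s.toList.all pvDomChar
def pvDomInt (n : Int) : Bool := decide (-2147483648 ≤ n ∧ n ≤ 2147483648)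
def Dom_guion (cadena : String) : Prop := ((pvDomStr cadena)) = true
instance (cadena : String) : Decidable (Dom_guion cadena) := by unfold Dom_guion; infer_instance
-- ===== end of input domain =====

-- B replaces A's index-driven while loop and accumulator with one closed-form
-- expression: "_" + cadena.replace(" ", " _") (same return value; idiomatic).

-- ===== PORT A =====
-- the while loop walks i = 0,1,…,len-1 reading cadena[i]; ported as the same
-- left-to-right walk over the characters with the accumulator 'resultado'
def guionGo : List Char → String → String
  | [], resultado => resultado
  | c :: t, resultado =>
      if c = ' ' then guionGo t (resultado ++ c.toString ++ "_")
      else guionGo t (resultado ++ c.toString)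

def guion (cadena : String) : String := guionGo cadena.toList "_"

-- ===== PORT B =====
def guion_alt (cadena : String) : String := "_" ++ PySem.Str.replace cadena " " " _"

-- ===== PRECONDITION & SPEC =====
def Spec_guion (cadena : String) (out : String) : Prop := out = guion_alt cadena
instance (cadena : String) (out : String) : Decidable (Spec_guion cadena out) := by unfold Spec_guion; infer_instance

-- ===== CLAIM (what is proved, stated in full; the proofs are below) =====
def Claim_equal_guion : Prop := ∀ (cadena : String), Dom_guion cadena → Spec_guion cadena (guion cadena)

-- ===== LEMMAS AND PROOFS =====

def guionF (c : Char) : List Char := if c = ' ' then [' ', '_'] else [c]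

theorem guionGo_toList (l : List Char) (res : String) :
    (guionGo l res).toList = res.toList ++ l.flatMap guionF := by
  induction l generalizing res with
  | nil => simp [guionGo]
  | cons c t ih =>
    by_cases h : c = ' ' <;>
      simp [guionGo, h, ih, guionF, Char.toString]

theorem replace_go_space (l : List Char) (fuel : Nat) (acc : List Char)
    (h : l.length ≤ fuel) :
    PySem.Chars.replace.go [' '] [' ', '_'] fuel l acc
      = acc.reverse ++ l.flatMap guionF := by
  induction l generalizing fuel acc with
  | nil => cases fuel <;> simp [PySem.Chars.replace.go]
  | cons c t ih =>
    cases fuel with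
    | zero => simp at h
    | succ f =>
      by_cases hc : c = ' '
      · have : [' '].isPrefixOf (c :: t) = true := by
          simp [List.isPrefixOf, hc]
        simp only [PySem.Chars.replace.go, this, if_pos, List.length_cons,
          List.length_nil, List.drop_succ_cons, List.drop_zero]
        rw [ih _ _ (by simpa using Nat.le_of_succ_le_succ h)]
        simp [guionF, hc]
      · have : [' '].isPrefixOf (c :: t) = false := by
          simp [List.isPrefixOf]; exact fun he => (hc he.symm).elim
        simp only [PySem.Chars.replace.go, this, Bool.false_eq_true, if_false]
        rw [ih _ _ (by simpa using Nat.le_of_succ_le_succ h)]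
        simp [hc, guionF]

theorem chars_replace_space (l : List Char) :
    PySem.Chars.replace l [' '] [' ', '_'] = l.flatMap guionF := by
  rw [PySem.Chars.replace]
  simp only [List.isEmpty, Bool.false_eq_true, if_false]
  exact replace_go_space l l.length [] le_rfl

-- ===== VERDICT (by name: the statement is the Claim_ definition above) =====
theorem guion_spec : Claim_equal_guion := by
  intro cadena _
  unfold Spec_guion guion guion_alt
  apply String.toList_injective
  rw [guionGo_toList]
  simp [PySem.Str.replace, chars_replace_space]
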